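-- pv_equiv track=rewrite | github.com/ABeGood/open-ai-assistant-test | telegram_bot/formatters.py | preserve_existing_markdown
-- ===== SOURCE A (Python) =====
-- def preserve_existing_markdown(text: str) -> str:
--     """
--     Temporarily replace existing markdown with placeholders.
--     """
--
--     # Store replacements to restore later
--     replacements = {
--         '**': '<<<BOLD>>>',
--         '*': '<<<ITALIC>>>',
--         '__': '<<<UNDERLINE>>>',
--         '~~': '<<<STRIKE>>>',
--         '`': '<<<CODE>>>',
--     }
--
--     for original, placeholder in replacements.items():
--         text = text.replace(original, placeholder)
--
--     return text
-- ===== SOURCE B (Python) =====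
-- def preserve_existing_markdown(text: str) -> str:
--     """
--     Temporarily replace existing markdown with placeholders.
--     Single left-to-right pass: at each position try the tokens in priority
--     order (** before *), instead of five sequential full-string scans.
--     """
--     placeholders = {
--         '**': '<<<BOLD>>>',
--         '*': '<<<ITALIC>>>',
--         '__': '<<<UNDERLINE>>>',
--         '~~': '<<<STRIKE>>>',
--         '`': '<<<CODE>>>',
--     }
--     tokens = ('**', '*', '__', '~~', '`')
--     out = []
--     i = 0
--     n = len(text)
--     while i < n:
--         for tok in tokens:
--             if text.startswith(tok, i):
--                 out.append(placeholders[tok])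
--                 i += len(tok)
--                 break
--         else:
--             out.append(text[i])
--             i += 1
--     return ''.join(out)
-- ===== Notes on version B (the rewrite author's own statement) =====
-- stated objective: alternative
-- what changed: A does five sequential full-string str.replace passes (one per token); B makes a single left-to-right pass that at each position tries the tokens in priority order (**, *, __, ~~, `) and emits the placeholder or copies the character.
import Mathlib
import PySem

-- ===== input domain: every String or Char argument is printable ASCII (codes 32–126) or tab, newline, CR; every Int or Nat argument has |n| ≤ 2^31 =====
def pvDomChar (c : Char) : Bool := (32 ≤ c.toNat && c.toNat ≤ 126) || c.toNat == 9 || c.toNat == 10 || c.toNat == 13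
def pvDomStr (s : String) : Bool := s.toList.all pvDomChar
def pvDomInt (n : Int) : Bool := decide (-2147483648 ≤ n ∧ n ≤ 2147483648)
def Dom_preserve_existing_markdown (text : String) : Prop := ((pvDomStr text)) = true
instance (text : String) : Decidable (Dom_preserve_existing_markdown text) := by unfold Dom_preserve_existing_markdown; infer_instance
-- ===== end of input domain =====

-- B replaces A's five sequential full-string str.replace passes with one left-to-right
-- scan that tries the tokens in priority order at each position (objective: alternative single-pass algorithm).


-- ===== PORT A =====
-- five sequential replace passes, in the dict's insertion order
def preserve_existing_markdown (text : String) : String :=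
  let t1 := PySem.Str.replace text "**" "<<<BOLD>>>"
  let t2 := PySem.Str.replace t1 "*" "<<<ITALIC>>>"
  let t3 := PySem.Str.replace t2 "__" "<<<UNDERLINE>>>"
  let t4 := PySem.Str.replace t3 "~~" "<<<STRIKE>>>"
  PySem.Str.replace t4 "`" "<<<CODE>>>"

-- ===== PORT B =====
def pvBOLD : List Char := ['<','<','<','B','O','L','D','>','>','>']
def pvITALIC : List Char := ['<','<','<','I','T','A','L','I','C','>','>','>']
def pvUL : List Char := ['<','<','<','U','N','D','E','R','L','I','N','E','>','>','>']
def pvSTRIKE : List Char := ['<','<','<','S','T','R','I','K','E','>','>','>']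
def pvCODE : List Char := ['<','<','<','C','O','D','E','>','>','>']

-- B's while loop: at each position try the tokens in priority order (startswith tests),
-- emit the matching placeholder and skip the token, else copy the character.
def pvScan : List Char → List Char
  | [] => []
  | c :: t =>
    if List.isPrefixOf ['*','*'] (c :: t) then pvBOLD ++ pvScan (t.drop 1)
    else if c = '*' then pvITALIC ++ pvScan t
    else if List.isPrefixOf ['_','_'] (c :: t) then pvUL ++ pvScan (t.drop 1)
    else if List.isPrefixOf ['~','~'] (c :: t) then pvSTRIKE ++ pvScan (t.drop 1)
    else if c = '`' then pvCODE ++ pvScan t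
    else c :: pvScan t
termination_by l => l.length
decreasing_by
  · simp only [List.length_drop, List.length_cons]; omega
  · simp only [List.length_cons]; omega
  · simp only [List.length_drop, List.length_cons]; omega
  · simp only [List.length_drop, List.length_cons]; omega
  · simp only [List.length_cons]; omega
  · simp only [List.length_cons]; omega

def preserve_existing_markdown_alt (text : String) : String :=
  String.ofList (pvScan text.toList)

-- ===== PRECONDITION & SPEC =====
def Spec_preserve_existing_markdown (text : String) (out : String) : Prop := out = preserve_existing_markdown_alt text
instance (text : String) (out : String) : Decidable (Spec_preserve_existing_markdown text out) := by unfold Spec_preserve_existing_markdown; infer_instance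

-- ===== CLAIM (what is proved, stated in full; the proofs are below) =====
def Claim_equal_preserve_existing_markdown : Prop := ∀ (text : String), Dom_preserve_existing_markdown text → Spec_preserve_existing_markdown text (preserve_existing_markdown text)

-- ===== LEMMAS AND PROOFS =====

-- A simple structural characterisation of Python's str.replace (nonempty pattern).
def pvRep (old new : List Char) : List Char → List Char
  | [] => []
  | c :: t =>
    if old.isPrefixOf (c :: t) then new ++ pvRep old new (t.drop (old.length - 1))
    else c :: pvRep old new t
termination_by l => l.length
decreasing_by
  · simp only [List.length_drop, List.length_cons]; omega
  · simp only [List.length_cons]; omega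

lemma pvGoSpec (o : Char) (old' new : List Char) :
    ∀ fuel l acc, l.length ≤ fuel →
      PySem.Chars.replace.go (o :: old') new fuel l acc = acc.reverse ++ pvRep (o :: old') new l := by
  intro fuel
  induction fuel with
  | zero =>
    intro l acc h
    have : l = [] := List.length_eq_zero_iff.mp (Nat.le_zero.mp h)
    subst this
    simp [PySem.Chars.replace.go, pvRep]
  | succ fuel ih =>
    intro l acc h
    cases l with
    | nil => simp [PySem.Chars.replace.go, pvRep]
    | cons c t =>
      simp only [List.length_cons] at h
      by_cases hp : (o :: old').isPrefixOf (c :: t)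
      · rw [show PySem.Chars.replace.go (o :: old') new (fuel+1) (c :: t) acc
              = PySem.Chars.replace.go (o :: old') new fuel (List.drop (o :: old').length (c :: t)) (new.reverse ++ acc) by
            simp [PySem.Chars.replace.go, hp]]
        have hd : List.drop (o :: old').length (c :: t) = t.drop old'.length := by
          simp [List.drop_succ_cons]
        rw [hd, ih _ _ (by simp only [List.length_drop]; omega)]
        rw [pvRep]
        simp [hp, List.reverse_append]
      · rw [show PySem.Chars.replace.go (o :: old') new (fuel+1) (c :: t) acc
              = PySem.Chars.replace.go (o :: old') new fuel t (c :: acc) by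
            simp [PySem.Chars.replace.go, hp]]
        rw [ih _ _ (by omega)]
        rw [pvRep]
        simp [hp]

lemma pvReplaceEq (o : Char) (old' new : List Char) (l : List Char) :
    PySem.Chars.replace l (o :: old') new = pvRep (o :: old') new l := by
  unfold PySem.Chars.replace
  rw [if_neg (by simp)]
  simpa using pvGoSpec o old' new l.length l [] le_rfl

lemma pvRep_neg (old new : List Char) (c : Char) (t : List Char)
    (h : ¬ old.isPrefixOf (c :: t)) :
    pvRep old new (c :: t) = c :: pvRep old new t := by
  rw [pvRep]; simp [h]

lemma pvRep1_pos (a : Char) (new r : List Char) :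
    pvRep [a] new (a :: r) = new ++ pvRep [a] new r := by
  rw [pvRep]; simp [List.isPrefixOf]

lemma pvRep2_pos (a b : Char) (new r : List Char) :
    pvRep [a,b] new (a :: b :: r) = new ++ pvRep [a,b] new r := by
  rw [pvRep]; simp [List.isPrefixOf]

lemma pvPrefCons_false (o c : Char) (old' X : List Char) (h : c ≠ o) :
    ¬ List.isPrefixOf (o :: old') (c :: X) := by
  intro hp
  obtain ⟨s, hs⟩ := List.isPrefixOf_iff_prefix.mp hp
  simp only [List.cons_append] at hs
  injection hs with h1 _
  exact h h1.symm

lemma pvPref2_false' (a b : Char) (X : List Char) (h : X.head? ≠ some b) :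
    ¬ List.isPrefixOf [a,b] (a :: X) := by
  cases X with
  | nil => simp [List.isPrefixOf]
  | cons d X' =>
    simp only [List.head?_cons, ne_eq, Option.some.injEq] at h
    simp [List.isPrefixOf]
    intro he; exact h he.symm

-- a block containing no character equal to the pattern head passes through untouched
lemma pvRep_append (o : Char) (old' new pre rest : List Char)
    (h : o ∉ pre) :
    pvRep (o :: old') new (pre ++ rest) = pre ++ pvRep (o :: old') new rest := by
  induction pre with
  | nil => simp
  | cons c pre' ih =>
    have hne : c ≠ o := by
      intro he; exact h (he ▸ List.mem_cons_self)
    rw [List.cons_append, pvRep_neg _ _ _ _ (pvPrefCons_false _ _ _ _ hne)]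
    rw [ih (fun hm => h (List.mem_cons_of_mem _ hm))]
    simp

-- the head of a replace result is '<' or the original head
lemma pvRep_head (old new l : List Char) (hd : Char)
    (hn : new.head? = some '<') (hhd : hd ≠ '<')
    (h : l.head? ≠ some hd) :
    (pvRep old new l).head? ≠ some hd := by
  cases l with
  | nil => simp [pvRep]
  | cons c t =>
    rw [pvRep]
    by_cases hp : old.isPrefixOf (c :: t)
    · rw [if_pos hp]
      cases new with
      | nil => simp at hn
      | cons n ns =>
        simp only [List.head?_cons, Option.some.injEq] at hn
        simp [hn]
        intro he; exact hhd he.symm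
    · rw [if_neg hp]
      simpa using h

def pvA (l : List Char) : List Char :=
  pvRep ['`'] pvCODE (pvRep ['~','~'] pvSTRIKE (pvRep ['_','_'] pvUL
    (pvRep ['*'] pvITALIC (pvRep ['*','*'] pvBOLD l))))

lemma pvMain : ∀ n l, l.length ≤ n → pvA l = pvScan l := by
  intro n
  induction n with
  | zero =>
    intro l h
    have : l = [] := List.length_eq_zero_iff.mp (Nat.le_zero.mp h)
    subst this
    simp [pvA, pvRep, pvScan]
  | succ n ih =>
    intro l h
    cases l with
    | nil => simp [pvA, pvRep, pvScan]
    | cons c t =>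
      simp only [List.length_cons] at h
      unfold pvA
      by_cases h1 : List.isPrefixOf ['*','*'] (c :: t)
      · -- token '**'
        cases t with
        | nil => exact absurd h1 (by simp [List.isPrefixOf])
        | cons d r =>
          simp only [List.isPrefixOf, Bool.and_eq_true, beq_iff_eq] at h1
          obtain ⟨hc, hd, -⟩ := h1
          subst hc; subst hd
          rw [pvRep2_pos,
              pvRep_append '*' _ _ _ _ (by decide),
              pvRep_append '_' _ _ _ _ (by decide),
              pvRep_append '~' _ _ _ _ (by decide),
              pvRep_append '`' _ _ _ _ (by decide)]
          rw [pvScan, if_pos (by simp [List.isPrefixOf])]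
          have hA := ih r (by simp only [List.length_cons] at h; omega)
          unfold pvA at hA
          rw [hA]
          rfl
      · by_cases h2 : c = '*'
        · -- token '*'
          subst h2
          rw [pvRep_neg _ _ _ _ h1, pvRep1_pos,
              pvRep_append '_' _ _ _ _ (by decide),
              pvRep_append '~' _ _ _ _ (by decide),
              pvRep_append '`' _ _ _ _ (by decide)]
          rw [pvScan, if_neg h1, if_pos rfl]
          have hA := ih t (by omega)
          unfold pvA at hA
          rw [hA]
        · by_cases h3 : List.isPrefixOf ['_','_'] (c :: t)
          · -- token '__'
            cases t with
            | nil => exact absurd h3 (by simp [List.isPrefixOf])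
            | cons d r =>
              simp only [List.isPrefixOf, Bool.and_eq_true, beq_iff_eq] at h3
              obtain ⟨hc, hd, -⟩ := h3
              subst hc; subst hd
              rw [pvRep_neg ['*','*'] pvBOLD '_' _ (pvPrefCons_false _ _ _ _ (by decide)),
                  pvRep_neg ['*','*'] pvBOLD '_' _ (pvPrefCons_false _ _ _ _ (by decide)),
                  pvRep_neg ['*'] pvITALIC '_' _ (pvPrefCons_false _ _ _ _ (by decide)),
                  pvRep_neg ['*'] pvITALIC '_' _ (pvPrefCons_false _ _ _ _ (by decide)),
                  pvRep2_pos,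
                  pvRep_append '~' _ _ _ _ (by decide),
                  pvRep_append '`' _ _ _ _ (by decide)]
              rw [pvScan, if_neg (pvPrefCons_false _ _ _ _ (by decide)), if_neg (by decide),
                  if_pos (by simp [List.isPrefixOf])]
              have hA := ih r (by simp only [List.length_cons] at h; omega)
              unfold pvA at hA
              rw [hA]
              rfl
          · by_cases h4 : c = '_'
            · -- lone '_' (copied verbatim by both programs)
              subst h4
              have ht : t.head? ≠ some '_' := by
                intro hh
                cases t with
                | nil => simp at hh
                | cons d t' =>
                  simp only [List.head?_cons, Option.some.injEq] at hh
                  subst hh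
                  exact h3 (by simp [List.isPrefixOf])
              have hX : (pvRep ['*'] pvITALIC (pvRep ['*','*'] pvBOLD t)).head? ≠ some '_' :=
                pvRep_head _ _ _ _ (by decide) (by decide)
                  (pvRep_head _ _ _ _ (by decide) (by decide) ht)
              rw [pvRep_neg ['*','*'] pvBOLD '_' _ (pvPrefCons_false _ _ _ _ (by decide)),
                  pvRep_neg ['*'] pvITALIC '_' _ (pvPrefCons_false _ _ _ _ (by decide)),
                  pvRep_neg ['_','_'] pvUL '_' _ (pvPref2_false' _ _ _ hX),
                  pvRep_neg ['~','~'] pvSTRIKE '_' _ (pvPrefCons_false _ _ _ _ (by decide)),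
                  pvRep_neg ['`'] pvCODE '_' _ (pvPrefCons_false _ _ _ _ (by decide))]
              rw [pvScan, if_neg h1, if_neg (by decide), if_neg h3,
                  if_neg (pvPrefCons_false _ _ _ _ (by decide)), if_neg (by decide)]
              have hA := ih t (by omega)
              unfold pvA at hA
              rw [hA]
            · by_cases h5 : List.isPrefixOf ['~','~'] (c :: t)
              · -- token '~~'
                cases t with
                | nil => exact absurd h5 (by simp [List.isPrefixOf])
                | cons d r =>
                  simp only [List.isPrefixOf, Bool.and_eq_true, beq_iff_eq] at h5
                  obtain ⟨hc, hd, -⟩ := h5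
                  subst hc; subst hd
                  rw [pvRep_neg ['*','*'] pvBOLD '~' _ (pvPrefCons_false _ _ _ _ (by decide)),
                      pvRep_neg ['*','*'] pvBOLD '~' _ (pvPrefCons_false _ _ _ _ (by decide)),
                      pvRep_neg ['*'] pvITALIC '~' _ (pvPrefCons_false _ _ _ _ (by decide)),
                      pvRep_neg ['*'] pvITALIC '~' _ (pvPrefCons_false _ _ _ _ (by decide)),
                      pvRep_neg ['_','_'] pvUL '~' _ (pvPrefCons_false _ _ _ _ (by decide)),
                      pvRep_neg ['_','_'] pvUL '~' _ (pvPrefCons_false _ _ _ _ (by decide)),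
                      pvRep2_pos,
                      pvRep_append '`' _ _ _ _ (by decide)]
                  rw [pvScan, if_neg (pvPrefCons_false _ _ _ _ (by decide)), if_neg (by decide),
                      if_neg (pvPrefCons_false _ _ _ _ (by decide)), if_pos (by simp [List.isPrefixOf])]
                  have hA := ih r (by simp only [List.length_cons] at h; omega)
                  unfold pvA at hA
                  rw [hA]
                  rfl
              · by_cases h6 : c = '~'
                · -- lone '~' (copied verbatim by both programs)
                  subst h6
                  have ht : t.head? ≠ some '~' := by
                    intro hh
                    cases t with
                    | nil => simp at hh
                    | cons d t' =>
                      simp only [List.head?_cons, Option.some.injEq] at hh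
                      subst hh
                      exact h5 (by simp [List.isPrefixOf])
                  have hX : (pvRep ['_','_'] pvUL (pvRep ['*'] pvITALIC
                      (pvRep ['*','*'] pvBOLD t))).head? ≠ some '~' :=
                    pvRep_head _ _ _ _ (by decide) (by decide)
                      (pvRep_head _ _ _ _ (by decide) (by decide)
                        (pvRep_head _ _ _ _ (by decide) (by decide) ht))
                  rw [pvRep_neg ['*','*'] pvBOLD '~' _ (pvPrefCons_false _ _ _ _ (by decide)),
                      pvRep_neg ['*'] pvITALIC '~' _ (pvPrefCons_false _ _ _ _ (by decide)),
                      pvRep_neg ['_','_'] pvUL '~' _ (pvPrefCons_false _ _ _ _ (by decide)),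
                      pvRep_neg ['~','~'] pvSTRIKE '~' _ (pvPref2_false' _ _ _ hX),
                      pvRep_neg ['`'] pvCODE '~' _ (pvPrefCons_false _ _ _ _ (by decide))]
                  rw [pvScan, if_neg h1, if_neg (by decide), if_neg h3, if_neg h5,
                      if_neg (by decide)]
                  have hA := ih t (by omega)
                  unfold pvA at hA
                  rw [hA]
                · by_cases h7 : c = '`'
                  · -- token '`'
                    subst h7
                    rw [pvRep_neg ['*','*'] pvBOLD '`' _ (pvPrefCons_false _ _ _ _ (by decide)),
                        pvRep_neg ['*'] pvITALIC '`' _ (pvPrefCons_false _ _ _ _ (by decide)),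
                        pvRep_neg ['_','_'] pvUL '`' _ (pvPrefCons_false _ _ _ _ (by decide)),
                        pvRep_neg ['~','~'] pvSTRIKE '`' _ (pvPrefCons_false _ _ _ _ (by decide)),
                        pvRep1_pos]
                    rw [pvScan, if_neg h1, if_neg (by decide), if_neg h3, if_neg h5,
                        if_pos rfl]
                    have hA := ih t (by omega)
                    unfold pvA at hA
                    rw [hA]
                  · -- ordinary character, copied
                    rw [pvRep_neg ['*','*'] pvBOLD c _ (pvPrefCons_false _ _ _ _ h2),
                        pvRep_neg ['*'] pvITALIC c _ (pvPrefCons_false _ _ _ _ h2),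
                        pvRep_neg ['_','_'] pvUL c _ (pvPrefCons_false _ _ _ _ h4),
                        pvRep_neg ['~','~'] pvSTRIKE c _ (pvPrefCons_false _ _ _ _ h6),
                        pvRep_neg ['`'] pvCODE c _ (pvPrefCons_false _ _ _ _ h7)]
                    rw [pvScan, if_neg h1, if_neg h2, if_neg h3, if_neg h5, if_neg h7]
                    have hA := ih t (by omega)
                    unfold pvA at hA
                    rw [hA]

-- ===== VERDICT (by name: the statement is the Claim_ definition above) =====
theorem preserve_existing_markdown_spec : Claim_equal_preserve_existing_markdown := by
  unfold Claim_equal_preserve_existing_markdown Spec_preserve_existing_markdown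
  intro text _
  apply String.toList_inj.mp
  unfold preserve_existing_markdown preserve_existing_markdown_alt
  simp only [PySem.Str.toList_replace]
  rw [show ("**" : String).toList = ['*','*'] from rfl,
      show ("*" : String).toList = ['*'] from rfl,
      show ("__" : String).toList = ['_','_'] from rfl,
      show ("~~" : String).toList = ['~','~'] from rfl,
      show ("`" : String).toList = ['`'] from rfl,
      show ("<<<BOLD>>>" : String).toList = pvBOLD from rfl,
      show ("<<<ITALIC>>>" : String).toList = pvITALIC from rfl,
      show ("<<<UNDERLINE>>>" : String).toList = pvUL from rfl,
      show ("<<<STRIKE>>>" : String).toList = pvSTRIKE from rfl,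
      show ("<<<CODE>>>" : String).toList = pvCODE from rfl]
  rw [pvReplaceEq, pvReplaceEq, pvReplaceEq, pvReplaceEq, pvReplaceEq]
  have hA := pvMain text.toList.length text.toList le_rfl
  unfold pvA at hA
  rw [hA]
  simp [String.toList_ofList]
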